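-- pv_equiv track=rewrite | github.com/chian-chen/CV-final | utils.py | event_filter
-- ===== SOURCE A (Python) =====
-- def event_filter(significant_movement_frames, grouping_threshold, min_event_length):
--
--     events = []
--     if significant_movement_frames:
--         current_event = [significant_movement_frames[0]]
--         for i in range(1, len(significant_movement_frames)):
--             if significant_movement_frames[i] - significant_movement_frames[i - 1] <= grouping_threshold:
--                 current_event.append(significant_movement_frames[i])
--             else:
--                 if len(current_event) >= min_event_length:
--                     events.append(current_event)
--                 current_event = [significant_movement_frames[i]]
--         if len(current_event) >= min_event_length:
--             events.append(current_event)
--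
--     return events
-- ===== SOURCE B (Python) =====
-- def event_filter(significant_movement_frames, grouping_threshold, min_event_length):
--     frames = significant_movement_frames
--     if not frames:
--         return []
--     n = len(frames)
--     splits = [i for i in range(1, n)
--               if frames[i] - frames[i - 1] > grouping_threshold]
--     bounds = [0] + splits + [n]
--     segments = [frames[a:b] for a, b in zip(bounds, bounds[1:])]
--     return [seg for seg in segments if len(seg) >= min_event_length]
-- ===== Notes on version B (the rewrite author's own statement) =====
-- stated objective: alternative
-- what changed: Replaces the stateful flush loop (current_event accumulator with inline length filtering) by a declarative pipeline: compute the gap split points, slice the list at those boundaries, then filter segments by length.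
import Mathlib
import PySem

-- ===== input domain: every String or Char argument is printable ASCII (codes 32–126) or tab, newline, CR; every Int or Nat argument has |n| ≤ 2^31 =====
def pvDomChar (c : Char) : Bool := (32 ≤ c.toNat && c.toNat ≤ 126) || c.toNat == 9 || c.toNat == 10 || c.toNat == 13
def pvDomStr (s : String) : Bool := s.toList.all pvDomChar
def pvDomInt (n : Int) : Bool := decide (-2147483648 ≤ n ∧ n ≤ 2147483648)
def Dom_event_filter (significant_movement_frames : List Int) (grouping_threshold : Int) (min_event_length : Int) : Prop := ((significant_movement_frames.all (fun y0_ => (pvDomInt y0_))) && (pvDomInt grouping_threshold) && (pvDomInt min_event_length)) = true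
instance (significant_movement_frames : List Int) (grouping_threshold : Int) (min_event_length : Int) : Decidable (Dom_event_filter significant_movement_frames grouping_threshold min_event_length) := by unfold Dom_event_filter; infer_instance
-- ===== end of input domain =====

-- B replaces A's stateful flush loop by a split-points-then-slice-then-filter pipeline (same cost; objective: alternative decomposition).

-- ===== PORT A =====
-- literal transliteration of A's flush loop; all indices i, i-1 are in range, so pyGetD's default is never used
def event_filter (significant_movement_frames : List Int) (grouping_threshold : Int) (min_event_length : Int) : List (List Int) :=
  match significant_movement_frames with
  | [] => []
  | x0 :: _ =>
    let n : Int := significant_movement_frames.length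
    let st := (PySem.List.pyRange 1 n 1).foldl
      (fun (st : List (List Int) × List Int) i =>
        if PySem.List.pyGetD significant_movement_frames i 0
             - PySem.List.pyGetD significant_movement_frames (i - 1) 0 ≤ grouping_threshold then
          (st.1, st.2 ++ [PySem.List.pyGetD significant_movement_frames i 0])
        else
          ((if min_event_length ≤ (st.2.length : Int) then st.1 ++ [st.2] else st.1),
           [PySem.List.pyGetD significant_movement_frames i 0]))
      ([], [x0])
    if min_event_length ≤ (st.2.length : Int) then st.1 ++ [st.2] else st.1

-- ===== PORT B =====
-- literal transliteration of Source B: split points, bounds, slices, length filter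
def event_filter_alt (significant_movement_frames : List Int) (grouping_threshold : Int) (min_event_length : Int) : List (List Int) :=
  if significant_movement_frames = [] then []
  else
    let n : Int := significant_movement_frames.length
    let splits := (PySem.List.pyRange 1 n 1).filter (fun i =>
      decide (grouping_threshold < PySem.List.pyGetD significant_movement_frames i 0
                - PySem.List.pyGetD significant_movement_frames (i - 1) 0))
    let bounds := 0 :: (splits ++ [n])
    let segments := (bounds.zip bounds.tail).map
      (fun p => PySem.List.slice significant_movement_frames (some p.1) (some p.2))
    segments.filter (fun seg => decide (min_event_length ≤ (seg.length : Int)))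

-- ===== PRECONDITION & SPEC =====
def Spec_event_filter (significant_movement_frames : List Int) (grouping_threshold : Int) (min_event_length : Int) (out : List (List Int)) : Prop := out = event_filter_alt significant_movement_frames grouping_threshold min_event_length
instance (significant_movement_frames : List Int) (grouping_threshold : Int) (min_event_length : Int) (out : List (List Int)) : Decidable (Spec_event_filter significant_movement_frames grouping_threshold min_event_length out) := by unfold Spec_event_filter; infer_instance

-- ===== CLAIM (what is proved, stated in full; the proofs are below) =====
def Claim_equal_event_filter : Prop := ∀ (significant_movement_frames : List Int) (grouping_threshold : Int) (min_event_length : Int), Dom_event_filter significant_movement_frames grouping_threshold min_event_length → Spec_event_filter significant_movement_frames grouping_threshold min_event_length (event_filter significant_movement_frames grouping_threshold min_event_length)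

-- ===== LEMMAS AND PROOFS =====

-- reference grouping: maximal runs of consecutive elements with gap ≤ g
def pvSegs (g : Int) : List Int → List (List Int)
  | [] => []
  | x :: t =>
    match pvSegs g t with
    | (y :: ys) :: r => if y - x ≤ g then (x :: y :: ys) :: r else [x] :: (y :: ys) :: r
    | r => [x] :: r

def pvFilt (m : Int) (l : List (List Int)) : List (List Int) :=
  l.filter (fun s => decide (m ≤ (s.length : Int)))

lemma pvSegs_cons (g x : Int) (t : List Int) :
    pvSegs g (x :: t) =
      match pvSegs g t with
      | (y :: ys) :: r => if y - x ≤ g then (x :: y :: ys) :: r else [x] :: (y :: ys) :: r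
      | r => [x] :: r := rfl

lemma pvSegs_shape (g : Int) (t : List Int) (x : Int) :
    ∃ s r, pvSegs g (x :: t) = (x :: s) :: r := by
  induction t generalizing x with
  | nil => exact ⟨[], [], rfl⟩
  | cons y t' ih =>
    obtain ⟨s, r, hs⟩ := ih y
    by_cases h : y - x ≤ g
    · exact ⟨y :: s, r, by rw [pvSegs_cons, hs]; simp [h]⟩
    · exact ⟨[], (y :: s) :: r, by rw [pvSegs_cons, hs]; simp [h]⟩

def pvF (g m : Int) : List (List Int) × List Int → Int × Int → List (List Int) × List Int :=
  fun st p =>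
    if p.2 - p.1 ≤ g then (st.1, st.2 ++ [p.2])
    else ((if m ≤ (st.2.length : Int) then st.1 ++ [st.2] else st.1), [p.2])

def pvFlush (m : Int) (st : List (List Int) × List Int) : List (List Int) :=
  if m ≤ (st.2.length : Int) then st.1 ++ [st.2] else st.1

lemma pair_map_eq (xs : List Int) :
    (PySem.List.pyRange 1 (xs.length : Int) 1).map
      (fun i => (PySem.List.pyGetD xs (i - 1) 0, PySem.List.pyGetD xs i 0))
      = xs.zip xs.tail := by
  apply List.ext_getElem
  · simp [PySem.List.length_pyRange_one]
  · intro k h1 h2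
    have hk : k < xs.length - 1 := by
      simpa [PySem.List.length_pyRange_one] using h1
    have hr : (PySem.List.pyRange 1 (xs.length : Int) 1)[k]'(by simpa using h1) = 1 + (k : Int) :=
      PySem.List.getElem_pyRange_one _ _ _ _
    simp only [List.getElem_map, hr, List.getElem_zip, List.getElem_tail]
    have e1 : (1 : Int) + (k : Int) - 1 = ((k : Nat) : Int) := by ring
    have e2 : (1 : Int) + (k : Int) = (((k + 1 : Nat)) : Int) := by push_cast; ring
    rw [e1, e2, PySem.List.pyGetD_natCast, PySem.List.pyGetD_natCast]
    have hx1 : k < xs.length := by omega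
    have hx2 : k + 1 < xs.length := by omega
    simp [List.getD_eq_getElem?_getD, hx1, hx2]

lemma pvFilt_singleton (m : Int) (c : List Int) :
    pvFilt m [c] = if m ≤ (c.length : Int) then [c] else [] := by
  by_cases h : m ≤ (c.length : Int) <;> simp [pvFilt, h]

lemma goA (g m : Int) (t : List Int) : ∀ (x : Int) (events : List (List Int)) (cur s : List Int)
    (r : List (List Int)), pvSegs g (x :: t) = (x :: s) :: r →
    pvFlush m (((x :: t).zip t).foldl (pvF g m) (events, cur))
      = events ++ pvFilt m ((cur ++ s) :: r) := by
  induction t with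
  | nil =>
    intro x events cur s r hseg
    have hseg' : ([x] : List Int) :: ([] : List (List Int)) = (x :: s) :: r := by
      simpa [pvSegs] using hseg.symm
    have hs2 : s = [] := by cases hseg'; rfl
    have hr2 : r = [] := by cases hseg'; rfl
    subst hs2; subst hr2
    simp only [List.zip_nil_right, List.foldl_nil, List.append_nil]
    rw [pvFilt_singleton]
    by_cases h : m ≤ ((cur.length : Nat) : Int) <;> simp [pvFlush, h]
  | cons y t' ih =>
    intro x events cur s r hseg
    obtain ⟨s', r', hs'⟩ := pvSegs_shape g t' y
    rw [pvSegs_cons, hs'] at hseg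
    have hz : ((x :: y :: t').zip (y :: t')) = (x, y) :: ((y :: t').zip t') := rfl
    rw [hz, List.foldl_cons]
    by_cases h : y - x ≤ g
    · have hseg' : (x :: y :: s') :: r' = (x :: s) :: r := by simpa [h] using hseg
      have hs2 : s = y :: s' := by cases hseg'; rfl
      have hr2 : r = r' := by cases hseg'; rfl
      have hstep : pvF g m (events, cur) (x, y) = (events, cur ++ [y]) := by
        simp [pvF, h]
      rw [hs2, hr2, hstep, ih y events (cur ++ [y]) s' r' hs']
      simp
    · have hseg' : ([x] : List Int) :: (y :: s') :: r' = (x :: s) :: r := by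
        simpa [h] using hseg
      have hs2 : s = [] := by cases hseg'; rfl
      have hr2 : r = (y :: s') :: r' := by cases hseg'; rfl
      subst hs2; subst hr2
      have hstep : pvF g m (events, cur) (x, y)
          = ((if m ≤ (cur.length : Int) then events ++ [cur] else events), [y]) := by
        simp [pvF, h]
      rw [hstep, ih y _ [y] s' r' hs']
      have hsplit : pvFilt m ((cur ++ []) :: (y :: s') :: r')
          = (if m ≤ (cur.length : Int) then [cur] else []) ++ pvFilt m ((y :: s') :: r') := by
        rw [show ((cur ++ []) :: (y :: s') :: r') = [cur] ++ ((y :: s') :: r') by simp]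
        simp only [pvFilt, List.filter_append]
        rw [show (List.filter (fun s => decide (m ≤ (s.length : Int))) [cur]) = pvFilt m [cur] from rfl]
        rw [pvFilt_singleton]
      rw [hsplit]
      by_cases hc : m ≤ (cur.length : Int) <;> simp [hc]

lemma event_filter_eq_segs (xs : List Int) (g m : Int) :
    event_filter xs g m = pvFilt m (pvSegs g xs) := by
  match xs with
  | [] => rfl
  | x :: t =>
    obtain ⟨s, r, hs⟩ := pvSegs_shape g t x
    have hfold : (PySem.List.pyRange 1 (((x :: t).length : Nat) : Int) 1).foldl
        (fun (st : List (List Int) × List Int) i =>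
          if PySem.List.pyGetD (x :: t) i 0 - PySem.List.pyGetD (x :: t) (i - 1) 0 ≤ g then
            (st.1, st.2 ++ [PySem.List.pyGetD (x :: t) i 0])
          else
            ((if m ≤ (st.2.length : Int) then st.1 ++ [st.2] else st.1),
             [PySem.List.pyGetD (x :: t) i 0]))
        ([], [x])
        = ((x :: t).zip t).foldl (pvF g m) ([], [x]) := by
      rw [show (fun (st : List (List Int) × List Int) i =>
          if PySem.List.pyGetD (x :: t) i 0 - PySem.List.pyGetD (x :: t) (i - 1) 0 ≤ g then
            (st.1, st.2 ++ [PySem.List.pyGetD (x :: t) i 0])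
          else
            ((if m ≤ (st.2.length : Int) then st.1 ++ [st.2] else st.1),
             [PySem.List.pyGetD (x :: t) i 0]))
          = (fun st i => pvF g m st (PySem.List.pyGetD (x :: t) (i - 1) 0,
              PySem.List.pyGetD (x :: t) i 0)) from rfl]
      rw [← List.foldl_map, pair_map_eq]
      rfl
    show pvFlush m _ = _
    rw [hfold, goA g m t x [] [x] s r hs, hs]
    simp

def pvP (xs : List Int) (g : Int) (i : Int) : Bool :=
  decide (g < PySem.List.pyGetD xs i 0 - PySem.List.pyGetD xs (i - 1) 0)

def pvPairs (xs : List Int) (bs : List Int) : List (List Int) :=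
  (bs.zip bs.tail).map (fun p => PySem.List.slice xs (some p.1) (some p.2))

lemma pvPairs_cons (xs : List Int) (c d : Int) (rest : List Int) :
    pvPairs xs (c :: d :: rest)
      = PySem.List.slice xs (some c) (some d) :: pvPairs xs (d :: rest) := rfl

lemma goB (xs : List Int) (g : Int) : ∀ (k a : Nat), a + k = xs.length → 1 ≤ a →
    pvPairs xs (((a : Int) - 1) ::
        ((PySem.List.pyRange (a : Int) (xs.length : Int) 1).filter (pvP xs g)
          ++ [(xs.length : Int)]))
      = pvSegs g (xs.drop (a - 1)) := by
  intro k
  induction k with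
  | zero =>
    intro a hak ha
    have hlen : ((xs.length : Nat) : Int) = (a : Int) := by exact_mod_cast hak.symm
    rw [hlen, PySem.List.pyRange_one_eq_nil le_rfl]
    simp only [List.filter_nil, List.nil_append]
    obtain ⟨z, hz⟩ : ∃ z, xs.drop (a - 1) = [z] := by
      have hl : (xs.drop (a - 1)).length = 1 := by rw [List.length_drop]; omega
      exact List.length_eq_one_iff.mp hl
    have hsl : PySem.List.slice xs (some ((a : Int) - 1)) (some (a : Int)) = [z] := by
      rw [PySem.List.slice_toNat xs (a := (a : Int) - 1) (b := (a : Int)) (by omega) (by omega)]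
      rw [show ((a : Int) - 1).toNat = a - 1 by omega, show ((a : Int)).toNat = a by omega, hz]
      rw [show a - (a - 1) = 1 by omega]
      rfl
    show [PySem.List.slice xs (some ((a : Int) - 1)) (some (a : Int))]
      = pvSegs g (xs.drop (a - 1))
    rw [hsl, hz]
    rfl
  | succ k ihk =>
    intro a hak ha
    have haln : a < xs.length := by omega
    have hlt : (a : Int) < (xs.length : Int) := by exact_mod_cast haln
    have ihk' := ihk (a + 1) (by omega) (by omega)
    rw [show (((a + 1 : Nat)) : Int) - 1 = (a : Int) by push_cast; ring] at ihk'
    rw [show (((a + 1 : Nat)) : Int) = (a : Int) + 1 by push_cast; ring] at ihk'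
    simp only [Nat.add_sub_cancel] at ihk'
    -- element facts
    have hdropa : xs.drop (a - 1) = xs[a - 1]'(by omega) :: xs.drop a := by
      rw [List.drop_eq_getElem_cons (l := xs) (i := a - 1) (by omega)]
      rw [show a - 1 + 1 = a by omega]
    have hdropa1 : xs.drop a = xs[a]'haln :: xs.drop (a + 1) :=
      List.drop_eq_getElem_cons haln
    have hP : pvP xs g (a : Int)
        = decide (g < xs[a]'haln - xs[a - 1]'(by omega)) := by
      unfold pvP
      rw [show ((a : Int)) - 1 = (((a - 1 : Nat)) : Int) by omega]
      rw [PySem.List.pyGetD_natCast, PySem.List.pyGetD_natCast]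
      rw [List.getD_eq_getElem?_getD, List.getD_eq_getElem?_getD]
      rw [List.getElem?_eq_getElem haln, List.getElem?_eq_getElem (by omega : a - 1 < xs.length)]
      rfl
    obtain ⟨s, r, hsr⟩ := pvSegs_shape g (xs.drop (a + 1)) (xs[a]'haln)
    have hsegA : pvSegs g (xs.drop a) = (xs[a]'haln :: s) :: r := by rw [hdropa1, hsr]
    rw [PySem.List.pyRange_one_cons hlt, List.filter_cons]
    by_cases hp : pvP xs g (a : Int) = true
    · -- gap at a: a is a split point, new segment starts at index a
      rw [if_pos hp, List.cons_append, pvPairs_cons, ihk']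
      have hgap : ¬ (xs[a]'haln - xs[a - 1]'(by omega) ≤ g) := by
        rw [hP] at hp
        have h2 := of_decide_eq_true hp
        omega
      have hsl : PySem.List.slice xs (some ((a : Int) - 1)) (some (a : Int))
          = [xs[a - 1]'(by omega)] := by
        rw [PySem.List.slice_toNat xs (a := (a : Int) - 1) (b := (a : Int)) (by omega) (by omega)]
        rw [show ((a : Int) - 1).toNat = a - 1 by omega, show ((a : Int)).toNat = a by omega]
        rw [hdropa, show a - (a - 1) = 1 by omega]
        rfl
      rw [hsl, hsegA, hdropa, hdropa1, pvSegs_cons, hsr]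
      simp [hgap]
    · -- no gap at a: element a-1 joins the segment that starts at index a
      rw [if_neg hp]
      have hgap : xs[a]'haln - xs[a - 1]'(by omega) ≤ g := by
        rw [hP] at hp
        simp only [decide_eq_true_eq] at hp
        omega
      obtain ⟨b, rest, hbr, hab, hbn⟩ : ∃ b rest,
          (PySem.List.pyRange ((a : Int) + 1) (xs.length : Int) 1).filter (pvP xs g)
            ++ [(xs.length : Int)] = b :: rest ∧ (a : Int) < b ∧ b ≤ (xs.length : Int) := by
        cases hF : (PySem.List.pyRange ((a : Int) + 1) (xs.length : Int) 1).filter (pvP xs g) with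
        | nil => exact ⟨(xs.length : Int), [], by simp, hlt, le_rfl⟩
        | cons b rest' =>
          have hbmem : b ∈ PySem.List.pyRange ((a : Int) + 1) (xs.length : Int) 1 := by
            have : b ∈ (PySem.List.pyRange ((a : Int) + 1) (xs.length : Int) 1).filter (pvP xs g) := by
              rw [hF]; exact List.mem_cons_self
            exact List.mem_of_mem_filter this
          have := (PySem.List.mem_pyRange_one).mp hbmem
          exact ⟨b, rest' ++ [(xs.length : Int)], by simp, by omega, by omega⟩
      rw [hbr] at ihk' ⊢
      rw [pvPairs_cons] at ihk' ⊢
      rw [hsegA] at ihk'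
      have hslice_a : PySem.List.slice xs (some (a : Int)) (some b) = xs[a]'haln :: s :=
        (List.cons.injEq _ _ _ _ ▸ ihk').1
      have hrest : pvPairs xs (b :: rest) = r := (List.cons.injEq _ _ _ _ ▸ ihk').2
      have hstep : PySem.List.slice xs (some ((a : Int) - 1)) (some b)
          = xs[a - 1]'(by omega) :: PySem.List.slice xs (some (a : Int)) (some b) := by
        rw [PySem.List.slice_toNat xs (a := (a : Int) - 1) (b := b) (by omega) (by omega),
            PySem.List.slice_toNat xs (a := (a : Int)) (b := b) (by omega) (by omega)]
        rw [show ((a : Int) - 1).toNat = a - 1 by omega, show ((a : Int)).toNat = a by omega]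
        rw [hdropa]
        rw [show b.toNat - (a - 1) = (b.toNat - a) + 1 by omega]
        rfl
      rw [hstep, hslice_a, hrest, hdropa, hdropa1, pvSegs_cons, hsr]
      simp [hgap]

lemma event_filter_alt_eq_segs (xs : List Int) (g m : Int) :
    event_filter_alt xs g m = pvFilt m (pvSegs g xs) := by
  by_cases hx : xs = []
  · subst hx; rfl
  · have h1 : 1 ≤ xs.length := by
      cases xs with
      | nil => exact absurd rfl hx
      | cons a t => simp
    have hseg := goB xs g (xs.length - 1) 1 (by omega) le_rfl
    simp only [Nat.cast_one] at hseg
    rw [show ((1 : Int) - 1) = 0 from rfl] at hseg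
    simp only [Nat.sub_self, List.drop_zero] at hseg
    unfold event_filter_alt
    rw [if_neg hx]
    show pvFilt m (pvPairs xs ((0 : Int) ::
        ((PySem.List.pyRange 1 (xs.length : Int) 1).filter (pvP xs g) ++ [(xs.length : Int)])))
      = pvFilt m (pvSegs g xs)
    rw [hseg]

-- ===== VERDICT (by name: the statement is the Claim_ definition above) =====
theorem event_filter_spec : Claim_equal_event_filter := by
  intro xs g m _
  unfold Spec_event_filter
  rw [event_filter_eq_segs, event_filter_alt_eq_segs]
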